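-- pv_equiv track=rewrite | github.com/RJTPP/ROUGE-Evaluation-Tool | rouge_score.py | get_dp_matrix
-- ===== SOURCE A (Python) =====
-- from typing import Union, Tuple, List
--
-- def get_dp_matrix(text1: str, text2: str) -> List[List[int]]:
--     words1 = text1.split()
--     words2 = text2.split()
--     m, n = len(words1), len(words2)
--
--     dp = [[0] * (n + 1) for _ in range(m + 1)]
--
--     # Fill DP table
--     for i in range(1, m + 1):
--         for j in range(1, n + 1):
--             # word matches
--             if words1[i - 1] == words2[j - 1]:
--                 dp[i][j] = dp[i - 1][j - 1] + 1
--             # word doesn't match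
--             else:
--                 dp[i][j] = max(dp[i - 1][j], dp[i][j - 1])
--
--     return dp
-- ===== SOURCE B (Python) =====
-- def get_dp_matrix(text1: str, text2: str):
--     words1 = text1.split()
--     words2 = text2.split()
--     memo = {}
--
--     def lcs(i, j):
--         if i == 0 or j == 0:
--             return 0
--         key = (i, j)
--         if key in memo:
--             return memo[key]
--         if words1[i - 1] == words2[j - 1]:
--             r = lcs(i - 1, j - 1) + 1
--         else:
--             r = max(lcs(i - 1, j), lcs(i, j - 1))
--         memo[key] = r
--         return r
--
--     return [[lcs(i, j) for j in range(len(words2) + 1)]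
--             for i in range(len(words1) + 1)]
-- ===== Notes on version B (the rewrite author's own statement) =====
-- stated objective: alternative
-- what changed: A preallocates an (m+1)x(n+1) zero matrix and fills it bottom-up by 2-D index assignment in two nested range loops; B computes each cell by a top-down recursive function lcs(i,j) caching results in a memo dictionary, and assembles the matrix by querying that recursion for every cell.
import Mathlib
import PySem

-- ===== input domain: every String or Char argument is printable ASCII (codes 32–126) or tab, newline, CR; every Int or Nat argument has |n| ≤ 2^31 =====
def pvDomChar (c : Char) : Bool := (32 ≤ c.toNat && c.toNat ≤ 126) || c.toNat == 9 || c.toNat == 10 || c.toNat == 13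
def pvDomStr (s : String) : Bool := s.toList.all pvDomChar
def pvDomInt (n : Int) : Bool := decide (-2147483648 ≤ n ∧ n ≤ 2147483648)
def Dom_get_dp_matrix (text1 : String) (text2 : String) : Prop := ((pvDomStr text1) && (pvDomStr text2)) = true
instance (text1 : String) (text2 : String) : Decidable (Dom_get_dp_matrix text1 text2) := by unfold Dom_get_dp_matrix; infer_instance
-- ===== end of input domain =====

-- B replaces A's bottom-up nested-loop matrix fill with a top-down memoized recursion
-- (a cell is computed on demand and cached in a dictionary); objective: alternative.

-- ===== PORT A =====
-- pyGetD/pySetD are exact here: every index A uses (i in 1..m, j in 1..n, i-1, j-1) is in range.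
def get_dp_matrix (text1 : String) (text2 : String) : List (List Int) :=
  let words1 := PySem.Str.split₀ text1
  let words2 := PySem.Str.split₀ text2
  let m := words1.length
  let n := words2.length
  let dp : List (List Int) := List.replicate (m + 1) (List.replicate (n + 1) 0)
  (PySem.List.pyRange 1 ((m : Int) + 1) 1).foldl (fun dp i =>
    (PySem.List.pyRange 1 ((n : Int) + 1) 1).foldl (fun dp j =>
      let v : Int :=
        if PySem.List.pyGetD words1 (i - 1) "" == PySem.List.pyGetD words2 (j - 1) "" then
          PySem.List.pyGetD (PySem.List.pyGetD dp (i - 1) []) (j - 1) 0 + 1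
        else
          max (PySem.List.pyGetD (PySem.List.pyGetD dp (i - 1) []) j 0)
              (PySem.List.pyGetD (PySem.List.pyGetD dp i []) (j - 1) 0)
      PySem.List.pySetD dp i (PySem.List.pySetD (PySem.List.pyGetD dp i []) j v)) dp) dp

-- ===== PORT B =====
-- the recursive helper lcs(i, j) of Source B; the memo dictionary (mutable in Python) is
-- threaded through explicitly.  List.getD is exact for words1[i-1]/words2[j-1]: the
-- callers only pass 1 ≤ i ≤ m, 1 ≤ j ≤ n, so the index is always in range.
def pvLcs (ws1 ws2 : List String) (i j : Nat) (memo : PySem.Dict (Nat × Nat) Int) :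
    Int × PySem.Dict (Nat × Nat) Int :=
  if _h : i = 0 ∨ j = 0 then (0, memo)
  else
    match memo.get? (i, j) with
    | some r => (r, memo)
    | none =>
      let p : Int × PySem.Dict (Nat × Nat) Int :=
        if ws1.getD (i - 1) "" == ws2.getD (j - 1) "" then
          let q := pvLcs ws1 ws2 (i - 1) (j - 1) memo
          (q.1 + 1, q.2)
        else
          let q1 := pvLcs ws1 ws2 (i - 1) j memo
          let q2 := pvLcs ws1 ws2 i (j - 1) q1.2
          (max q1.1 q2.1, q2.2)
      (p.1, p.2.insert (i, j) p.1)
termination_by i + j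
decreasing_by all_goals omega

def get_dp_matrix_alt (text1 : String) (text2 : String) : List (List Int) :=
  let words1 := PySem.Str.split₀ text1
  let words2 := PySem.Str.split₀ text2
  ((List.range (words1.length + 1)).foldl
    (fun (st : List (List Int) × PySem.Dict (Nat × Nat) Int) i =>
      let rm := (List.range (words2.length + 1)).foldl
        (fun (st2 : List Int × PySem.Dict (Nat × Nat) Int) j =>
          let p := pvLcs words1 words2 i j st2.2
          (st2.1 ++ [p.1], p.2)) (([] : List Int), st.2)
      (st.1 ++ [rm.1], rm.2)) (([] : List (List Int)), PySem.Dict.empty)).1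

-- ===== PRECONDITION & SPEC =====
def Spec_get_dp_matrix (text1 : String) (text2 : String) (out : List (List Int)) : Prop := out = get_dp_matrix_alt text1 text2
instance (text1 : String) (text2 : String) (out : List (List Int)) : Decidable (Spec_get_dp_matrix text1 text2 out) := by unfold Spec_get_dp_matrix; infer_instance

-- ===== CLAIM (what is proved, stated in full; the proofs are below) =====
def Claim_equal_get_dp_matrix : Prop := ∀ (text1 : String) (text2 : String), Dom_get_dp_matrix text1 text2 → Spec_get_dp_matrix text1 text2 (get_dp_matrix text1 text2)

-- ===== LEMMAS AND PROOFS =====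

-- pvL ws1 ws2 i j is the LCS-table value of cell (i, j); pvRow is row i of that table.
def pvL (ws1 ws2 : List String) : Nat → Nat → Int
  | 0, _ => 0
  | _ + 1, 0 => 0
  | i + 1, j + 1 =>
    if ws1.getD i "" == ws2.getD j "" then pvL ws1 ws2 i j + 1
    else max (pvL ws1 ws2 i (j + 1)) (pvL ws1 ws2 (i + 1) j)

def pvRow (ws1 ws2 : List String) (i : Nat) : List Int :=
  (List.range (ws2.length + 1)).map (pvL ws1 ws2 i)

theorem pvL_zero (ws1 ws2 : List String) (j : Nat) : pvL ws1 ws2 0 j = 0 := by cases j <;> simp [pvL]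

theorem pvRow_zero (ws1 ws2 : List String) :
    pvRow ws1 ws2 0 = List.replicate (ws2.length + 1) 0 := by
  simp [pvRow, pvL_zero, List.eq_replicate_iff]

theorem pvRow_getD (ws1 ws2 : List String) (i j : Nat) (hj : j ≤ ws2.length) :
    (pvRow ws1 ws2 i).getD j 0 = pvL ws1 ws2 i j := by
  exact PySem.List.getD_map_range _ _ _ _ (by omega)

theorem pvL_succ_zero (ws1 ws2 : List String) (i : Nat) : pvL ws1 ws2 (i+1) 0 = 0 := by
  simp [pvL]

-- ---- A-side: the nested index-assignment loops compute the pvL table ----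

def pvStep (ws1 ws2 : List String) (dp : List (List Int)) (i j : Int) : List (List Int) :=
  let v : Int :=
    if PySem.List.pyGetD ws1 (i - 1) "" == PySem.List.pyGetD ws2 (j - 1) "" then
      PySem.List.pyGetD (PySem.List.pyGetD dp (i - 1) []) (j - 1) 0 + 1
    else
      max (PySem.List.pyGetD (PySem.List.pyGetD dp (i - 1) []) j 0)
          (PySem.List.pyGetD (PySem.List.pyGetD dp i []) (j - 1) 0)
  PySem.List.pySetD dp i (PySem.List.pySetD (PySem.List.pyGetD dp i []) j v)

def pvPartial (ws1 ws2 : List String) (i1 k : Nat) : List Int :=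
  (List.range (k+1)).map (pvL ws1 ws2 i1) ++ List.replicate (ws2.length - k) 0

theorem pvPartial_zero (ws1 ws2 : List String) (i : Nat) :
    pvPartial ws1 ws2 (i+1) 0 = List.replicate (ws2.length + 1) 0 := by
  simp [pvPartial, pvL_succ_zero, List.replicate_succ]

theorem pvPartial_last (ws1 ws2 : List String) (i : Nat) :
    pvPartial ws1 ws2 i ws2.length = pvRow ws1 ws2 i := by
  simp [pvPartial, pvRow]

theorem innerA (ws1 ws2 : List String) (i : Nat) :
    ∀ k, k ≤ ws2.length →
    (List.range k).foldl (fun dp (j0 : Nat) => pvStep ws1 ws2 dp (1 + (i : Int)) (1 + (j0 : Int)))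
        ((List.range (i+1)).map (pvRow ws1 ws2) ++ pvPartial ws1 ws2 (i+1) 0 ::
          List.replicate (ws1.length - (i+1)) (pvRow ws1 ws2 0))
    = (List.range (i+1)).map (pvRow ws1 ws2) ++ pvPartial ws1 ws2 (i+1) k ::
          List.replicate (ws1.length - (i+1)) (pvRow ws1 ws2 0) := by
  intro k
  induction k with
  | zero => intro _; simp
  | succ k ih =>
    intro hk
    rw [show List.range (k+1) = List.range k ++ [k] from List.range_succ,
        List.foldl_append, ih (by omega), List.foldl_cons, List.foldl_nil]
    set A := (List.range (i+1)).map (pvRow ws1 ws2) with hA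
    set R := List.replicate (ws1.length - (i+1)) (pvRow ws1 ws2 0) with hR
    have hAlen : A.length = i + 1 := by simp [hA]
    have e1 : (1 + (i : Int)) - 1 = ((i : Nat) : Int) := by ring
    have e2 : (1 + (i : Int)) = (((i + 1 : Nat)) : Int) := by push_cast; ring
    have e3 : (1 + (k : Int)) - 1 = ((k : Nat) : Int) := by ring
    have e4 : (1 + (k : Int)) = (((k + 1 : Nat)) : Int) := by push_cast; ring
    unfold pvStep
    rw [e1, e3, e2, e4]
    simp only [PySem.List.pyGetD_natCast, PySem.List.pySetD_natCast]
    have hg1 : (A ++ pvPartial ws1 ws2 (i+1) k :: R).getD i [] = pvRow ws1 ws2 i := by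
      rw [List.getD_append _ _ _ i (by omega), hA, PySem.List.getD_map_range _ _ _ _ (by omega)]
    have hg2 : (A ++ pvPartial ws1 ws2 (i+1) k :: R).getD (i+1) [] = pvPartial ws1 ws2 (i+1) k := by
      rw [List.getD_append_right _ _ _ _ (by omega)]
      simp [hAlen]
    have hg3 : (pvPartial ws1 ws2 (i+1) k).getD k 0 = pvL ws1 ws2 (i+1) k := by
      unfold pvPartial
      rw [List.getD_append _ _ _ k (by simp), PySem.List.getD_map_range _ _ _ _ (by omega)]
    rw [hg1, hg2, hg3, pvRow_getD ws1 ws2 i k (by omega), pvRow_getD ws1 ws2 i (k+1) (by omega)]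
    have hv : (if ws1.getD i "" == ws2.getD k "" then pvL ws1 ws2 i k + 1
        else max (pvL ws1 ws2 i (k+1)) (pvL ws1 ws2 (i+1) k)) = pvL ws1 ws2 (i+1) (k+1) := by
      simp [pvL]
    rw [hv]
    rw [List.set_append]
    simp only [hAlen, if_neg (by omega : ¬ (i+1 < i+1))]
    have hsetrow : (pvPartial ws1 ws2 (i+1) k).set (k+1) (pvL ws1 ws2 (i+1) (k+1))
        = pvPartial ws1 ws2 (i+1) (k+1) := by
      unfold pvPartial
      rw [List.set_append]
      simp only [List.length_map, List.length_range, if_neg (by omega : ¬ (k+1 < k+1))]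
      have : ws2.length - k = (ws2.length - (k+1)) + 1 := by omega
      rw [this, List.replicate_succ]
      simp [List.range_succ]
    have : (i + 1) - (i + 1) = 0 := by omega
    rw [this]
    simp only [List.set_cons_zero, hsetrow]

theorem outerA (ws1 ws2 : List String) : ∀ i, i ≤ ws1.length →
    (List.range i).foldl (fun dp (i0 : Nat) =>
        (PySem.List.pyRange 1 ((ws2.length : Int) + 1) 1).foldl
          (fun dp j => pvStep ws1 ws2 dp (1 + (i0 : Int)) j) dp)
        (List.replicate (ws1.length + 1) (List.replicate (ws2.length + 1) 0))
    = (List.range (i+1)).map (pvRow ws1 ws2) ++ List.replicate (ws1.length - i) (pvRow ws1 ws2 0) := by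
  intro i
  induction i with
  | zero =>
    intro _
    simp [pvRow_zero, List.replicate_succ]
  | succ i ih =>
    intro hi
    rw [show List.range (i+1) = List.range i ++ [i] from List.range_succ,
        List.foldl_append, ih (by omega), List.foldl_cons, List.foldl_nil]
    have hrng : PySem.List.pyRange 1 ((ws2.length : Int) + 1) 1
        = (List.range ws2.length).map (fun k : Nat => 1 + (k : Int)) := by
      have ht : (((ws2.length : Int) + 1) - 1).toNat = ws2.length := by omega
      rw [PySem.List.pyRange_one, ht]
    rw [hrng, List.foldl_map]
    have hstart : (List.range (i+1)).map (pvRow ws1 ws2) ++ List.replicate (ws1.length - i) (pvRow ws1 ws2 0)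
        = (List.range (i+1)).map (pvRow ws1 ws2) ++ pvPartial ws1 ws2 (i+1) 0 ::
            List.replicate (ws1.length - (i+1)) (pvRow ws1 ws2 0) := by
      rw [pvPartial_zero, ← pvRow_zero]
      have : ws1.length - i = (ws1.length - (i+1)) + 1 := by omega
      rw [this, List.replicate_succ]
    rw [hstart, innerA ws1 ws2 i ws2.length (by omega), pvPartial_last]
    rw [show List.range (i+1+1) = List.range (i+1) ++ [i+1] from List.range_succ]
    simp

theorem a_eq (text1 text2 : String) :
    get_dp_matrix text1 text2 =
      (List.range ((PySem.Str.split₀ text1).length + 1)).map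
        (pvRow (PySem.Str.split₀ text1) (PySem.Str.split₀ text2)) := by
  set ws1 := PySem.Str.split₀ text1
  set ws2 := PySem.Str.split₀ text2
  have h0 : get_dp_matrix text1 text2
      = (PySem.List.pyRange 1 ((ws1.length : Int) + 1) 1).foldl (fun dp i =>
          (PySem.List.pyRange 1 ((ws2.length : Int) + 1) 1).foldl
            (fun dp j => pvStep ws1 ws2 dp i j) dp)
          (List.replicate (ws1.length + 1) (List.replicate (ws2.length + 1) 0)) := rfl
  rw [h0]
  have hout : PySem.List.pyRange 1 ((ws1.length : Int) + 1) 1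
      = (List.range ws1.length).map (fun k : Nat => 1 + (k : Int)) := by
    have ht : (((ws1.length : Int) + 1) - 1).toNat = ws1.length := by omega
    rw [PySem.List.pyRange_one, ht]
  rw [hout, List.foldl_map]
  have ho := outerA ws1 ws2 ws1.length (le_refl _)
  simp only [Nat.sub_self, List.replicate_zero, List.append_nil] at ho
  exact ho

-- ---- B-side: the memoized recursion computes the pvL table ----

-- the memo invariant: every cached entry is the true table value
def MemoOK (ws1 ws2 : List String) (d : PySem.Dict (Nat × Nat) Int) : Prop :=
  ∀ i j r, d.get? (i, j) = some r → r = pvL ws1 ws2 i j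

theorem memoOK_empty (ws1 ws2 : List String) : MemoOK ws1 ws2 PySem.Dict.empty := by
  intro i j r h
  simp [PySem.Dict.get?_empty] at h

theorem pvLcs_spec (ws1 ws2 : List String) :
    ∀ n i j memo, i + j ≤ n → MemoOK ws1 ws2 memo →
      (pvLcs ws1 ws2 i j memo).1 = pvL ws1 ws2 i j ∧
      MemoOK ws1 ws2 (pvLcs ws1 ws2 i j memo).2 := by
  intro n
  induction n with
  | zero =>
    intro i j memo hn hm
    have hi : i = 0 := by omega
    subst hi
    rw [pvLcs]
    simp [pvL_zero, hm]
  | succ n ih =>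
    intro i j memo hn hm
    rw [pvLcs]
    by_cases h0 : i = 0 ∨ j = 0
    · rw [dif_pos h0]
      constructor
      · rcases h0 with h | h <;> subst h
        · simp [pvL_zero]
        · cases i <;> simp [pvL_succ_zero, pvL_zero]
      · exact hm
    · rw [dif_neg h0]
      push Not at h0
      obtain ⟨i', rfl⟩ : ∃ i', i = i' + 1 := ⟨i - 1, by omega⟩
      obtain ⟨j', rfl⟩ : ∃ j', j = j' + 1 := ⟨j - 1, by omega⟩
      cases hget : memo.get? (i' + 1, j' + 1) with
      | some r =>
        exact ⟨hm _ _ _ hget, hm⟩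
      | none =>
        simp only [Nat.add_sub_cancel]
        by_cases hw : ws1.getD i' "" == ws2.getD j' ""
        · rw [if_pos hw]
          obtain ⟨hv, hmok⟩ := ih i' j' memo (by omega) hm
          have hpl : pvL ws1 ws2 (i'+1) (j'+1) = pvL ws1 ws2 i' j' + 1 := by
            simp only [pvL]
            rw [if_pos hw]
          refine ⟨by simp [hv, hpl], ?_⟩
          intro a b r hr
          rw [PySem.Dict.get?_insert] at hr
          split at hr
          · rename_i hk
            injection hr with hr
            rw [Prod.mk.injEq] at hk
            obtain ⟨ha, hb⟩ := hk
            subst ha; subst hb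
            simp [← hr, hv, hpl]
          · exact hmok _ _ _ hr
        · rw [if_neg hw]
          obtain ⟨hv1, hm1⟩ := ih i' (j' + 1) memo (by omega) hm
          obtain ⟨hv2, hm2⟩ := ih (i' + 1) j' _ (by omega) hm1
          have hpl : pvL ws1 ws2 (i'+1) (j'+1)
              = max (pvL ws1 ws2 i' (j'+1)) (pvL ws1 ws2 (i'+1) j') := by
            simp only [pvL]
            rw [if_neg hw]
          refine ⟨by simp [hv1, hv2, hpl], ?_⟩
          intro a b r hr
          rw [PySem.Dict.get?_insert] at hr
          split at hr
          · rename_i hk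
            injection hr with hr
            rw [Prod.mk.injEq] at hk
            obtain ⟨ha, hb⟩ := hk
            subst ha; subst hb
            simp [← hr, hv1, hv2, hpl]
          · exact hm2 _ _ _ hr

theorem inner_fold (ws1 ws2 : List String) (i : Nat) :
    ∀ (js : List Nat) (acc : List Int) (memo : PySem.Dict (Nat × Nat) Int),
      MemoOK ws1 ws2 memo →
      (js.foldl (fun (st2 : List Int × PySem.Dict (Nat × Nat) Int) j =>
          let p := pvLcs ws1 ws2 i j st2.2
          (st2.1 ++ [p.1], p.2)) (acc, memo)).1 = acc ++ js.map (pvL ws1 ws2 i)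
      ∧ MemoOK ws1 ws2 ((js.foldl (fun (st2 : List Int × PySem.Dict (Nat × Nat) Int) j =>
          let p := pvLcs ws1 ws2 i j st2.2
          (st2.1 ++ [p.1], p.2)) (acc, memo)).2) := by
  intro js
  induction js with
  | nil => intro acc memo hm; simpa using hm
  | cons j js ih =>
    intro acc memo hm
    obtain ⟨hv, hmok⟩ := pvLcs_spec ws1 ws2 (i + j) i j memo (le_refl _) hm
    simp only [List.foldl_cons]
    obtain ⟨h1, h2⟩ := ih (acc ++ [(pvLcs ws1 ws2 i j memo).1]) _ hmok
    refine ⟨?_, h2⟩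
    rw [h1, hv]
    simp

theorem outer_fold (ws1 ws2 : List String) :
    ∀ (is : List Nat) (acc : List (List Int)) (memo : PySem.Dict (Nat × Nat) Int),
      MemoOK ws1 ws2 memo →
      (is.foldl (fun (st : List (List Int) × PySem.Dict (Nat × Nat) Int) i =>
          let rm := (List.range (ws2.length + 1)).foldl
            (fun (st2 : List Int × PySem.Dict (Nat × Nat) Int) j =>
              let p := pvLcs ws1 ws2 i j st2.2
              (st2.1 ++ [p.1], p.2)) (([] : List Int), st.2)
          (st.1 ++ [rm.1], rm.2)) (acc, memo)).1
        = acc ++ is.map (pvRow ws1 ws2) := by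
  intro is
  induction is with
  | nil => intro acc memo _; simp
  | cons i is ih =>
    intro acc memo hm
    simp only [List.foldl_cons]
    obtain ⟨h1, h2⟩ := inner_fold ws1 ws2 i (List.range (ws2.length + 1)) [] memo hm
    rw [ih _ _ h2, h1]
    simp [pvRow]

theorem alt_eq (text1 text2 : String) :
    get_dp_matrix_alt text1 text2 =
      (List.range ((PySem.Str.split₀ text1).length + 1)).map
        (pvRow (PySem.Str.split₀ text1) (PySem.Str.split₀ text2)) := by
  set ws1 := PySem.Str.split₀ text1
  set ws2 := PySem.Str.split₀ text2
  have h := outer_fold ws1 ws2 (List.range (ws1.length + 1)) [] PySem.Dict.empty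
      (memoOK_empty ws1 ws2)
  simpa [get_dp_matrix_alt] using h

-- ===== VERDICT (by name: the statement is the Claim_ definition above) =====
theorem get_dp_matrix_spec : Claim_equal_get_dp_matrix := by
  intro text1 text2 _
  unfold Spec_get_dp_matrix
  rw [a_eq, alt_eq]
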